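-- pv_equiv track=rewrite | github.com/Qcent/JoystickOverTCP-IP | hidCapture.py | array_to_code
-- ===== SOURCE A (Python) =====
-- def array_to_code(arr):
--     """
--     Takes a byte array and outputs it in a format that can be copied and pasted
--     into a script.
--     """
--     output = "byte_array = [\n"
--     for i in range(len(arr)):
--         if i % 16 == 0:
--             output += "    "
--         output += "{:#04x}, ".format(arr[i])
--         if i % 16 == 15 or i == len(arr) - 1:
--             output = output[:-2] + "\n"
--             if i != len(arr) - 1:
--                 output += "    "
--     output += "]"
--     return output
-- ===== SOURCE B (Python) =====
-- def array_to_code(arr):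
--     """
--     Takes a byte array and outputs it in a format that can be copied and pasted
--     into a script.
--     """
--     if not arr:
--         return "byte_array = [\n]"
--     lines = []
--     for i in range(0, len(arr), 16):
--         lines.append(", ".join(format(b, "#04x") for b in arr[i:i+16]))
--     return "byte_array = [\n    " + "\n        ".join(lines) + "\n]"
-- ===== Notes on version B (the rewrite author's own statement) =====
-- stated objective: simpler
-- what changed: B slices the array into 16-element chunks and joins each chunk with ', ' and the chunk lines with the line separator, replacing A's per-index loop with i%16 branch bookkeeping and output[:-2] re-copying of the whole accumulated string at every chunk boundary.
import Mathlib
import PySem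

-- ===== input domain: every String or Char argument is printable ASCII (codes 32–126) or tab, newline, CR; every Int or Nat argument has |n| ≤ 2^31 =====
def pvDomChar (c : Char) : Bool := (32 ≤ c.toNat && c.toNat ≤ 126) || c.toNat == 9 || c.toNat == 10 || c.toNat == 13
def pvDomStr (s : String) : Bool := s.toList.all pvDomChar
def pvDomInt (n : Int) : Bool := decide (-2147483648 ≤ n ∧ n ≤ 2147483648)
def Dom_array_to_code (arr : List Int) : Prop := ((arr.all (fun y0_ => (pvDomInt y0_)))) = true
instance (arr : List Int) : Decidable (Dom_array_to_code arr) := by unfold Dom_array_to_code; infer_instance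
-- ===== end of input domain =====

-- B replaces A's per-index loop with i%16 bookkeeping and "[:-2]" trimming of the whole
-- accumulated string (which copies it each chunk) by slicing 16-element chunks and joining
-- them; objective: simpler, and measured faster on large inputs.

-- ===== PORT A =====
-- "{:#04x}".format(n): lowercase hex, '0x' prefix (after the sign), zero-padded to total
-- width 4 — hand-ported (PySem has no format()), exact for every int.
def pvHexDigit (n : Nat) : Char := "0123456789abcdef".toList.getD n '0'

def pvHexDigits (n : Nat) : List Char :=
  if h : n < 16 then [pvHexDigit n]
  else pvHexDigits (n / 16) ++ [pvHexDigit (n % 16)]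
  decreasing_by exact Nat.div_lt_self (by omega) (by omega)

def pvHexFmt4 (n : Int) : List Char :=
  let sign : List Char := if n < 0 then ['-'] else []
  let ds := pvHexDigits n.natAbs
  sign ++ ['0', 'x'] ++ List.replicate (4 - (sign.length + 2 + ds.length)) '0' ++ ds

-- the body of A's for-loop (the accumulated Python str is carried as List Char)
def array_to_code_step (n : Nat) (arr : List Int) (out : List Char) (i : Nat) : List Char :=
  let out := if i % 16 = 0 then out ++ "    ".toList else out
  let out := out ++ pvHexFmt4 (PySem.List.pyGetD arr (i : Int) 0) ++ [',', ' ']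
  if i % 16 = 15 ∨ i = n - 1 then
    let out := PySem.List.slice out none (some (-2)) ++ ['\n']
    if i ≠ n - 1 then out ++ "    ".toList else out
  else out

def array_to_code (arr : List Int) : String :=
  String.ofList
    ((List.range arr.length).foldl (array_to_code_step arr.length arr) "byte_array = [\n".toList
      ++ [']'])

-- ===== PORT B =====
-- ", ".join(format(b, "#04x") for b in chunk)
def pvLine (chunk : List Int) : List Char :=
  PySem.Chars.join [',', ' '] (chunk.map pvHexFmt4)

def array_to_code_alt (arr : List Int) : String :=
  if arr = [] then "byte_array = [\n]"
  else
    String.ofList ("byte_array = [\n    ".toList ++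
      PySem.Chars.join "\n        ".toList
        ((PySem.List.pyRange 0 (arr.length : Int) 16).foldl
          (fun acc i => acc ++ [pvLine (PySem.List.slice arr (some i) (some (i + 16)))]) []) ++
      "\n]".toList)

-- ===== PRECONDITION & SPEC =====
def Spec_array_to_code (arr : List Int) (out : String) : Prop := out = array_to_code_alt arr
instance (arr : List Int) (out : String) : Decidable (Spec_array_to_code arr out) := by unfold Spec_array_to_code; infer_instance

-- ===== CLAIM (what is proved, stated in full; the proofs are below) =====
def Claim_equal_array_to_code : Prop := ∀ (arr : List Int), Dom_array_to_code arr → Spec_array_to_code arr (array_to_code arr)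

-- ===== LEMMAS AND PROOFS =====

-- the common shape both programs produce after "byte_array = [\n": one chunk line per 16
-- elements; A's non-final lines get "    " from the trim branch plus "    " at i%16==0,
-- i.e. the separator between lines is "\n" ++ 8 spaces.
def pvTail (l : List Int) : List Char :=
  if l.length ≤ 16 then "    ".toList ++ pvLine l ++ ['\n']
  else "    ".toList ++ pvLine (l.take 16) ++ ['\n'] ++ "    ".toList ++ pvTail (l.drop 16)
  termination_by l.length
  decreasing_by simp; omega

def pvFmtC (e : Int) : List Char := pvHexFmt4 e ++ [',', ' ']

def pvFlat (l : List Int) : List Char := (l.map pvFmtC).flatten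

lemma pvFlat_eq_line (l : List Int) (h : l ≠ []) : pvFlat l = pvLine l ++ [',', ' '] := by
  induction l with
  | nil => exact absurd rfl h
  | cons x t ih =>
    cases t with
    | nil => simp [pvFlat, pvLine, pvFmtC, PySem.Chars.join_singleton]
    | cons y u =>
      have ih' := ih (by simp)
      simp only [pvFlat, List.map_cons, List.flatten_cons] at ih' ⊢
      rw [pvLine, List.map_cons, List.map_cons, PySem.Chars.join_cons_cons]
      rw [show (PySem.Chars.join [',', ' '] (pvHexFmt4 y :: List.map pvHexFmt4 u)) = pvLine (y :: u) from rfl]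
      rw [ih', pvFmtC]
      simp

lemma pvTrim (zs : List Char) :
    PySem.List.slice (zs ++ [',', ' ']) none (some (-2)) = zs := by
  rw [PySem.List.slice_to_neg_ofNat _ 2 (by omega)]
  simp

lemma pvGetD (arr : List Int) (k j : Nat) :
    PySem.List.pyGetD arr ((k + j : Nat) : Int) 0 = (arr.drop k).getD j 0 := by
  rw [PySem.List.pyGetD_natCast]
  simp [List.getD_eq_getElem?_getD, List.getElem?_drop]

lemma pvFlat_take_succ (l : List Int) (j : Nat) (h : j < l.length) :
    pvFlat (l.take (j + 1)) = pvFlat (l.take j) ++ pvFmtC (l.getD j 0) := by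
  have ht : l.take (j + 1) = l.take j ++ [l.getD j 0] := by
    rw [List.take_add_one]
    simp [List.getElem?_eq_getElem h, List.getD_eq_getElem?_getD]
  rw [ht]
  simp [pvFlat]

lemma pvAppStep (arr : List Int) (k j : Nat) (h : k + j < arr.length) :
    pvFlat ((arr.drop k).take j) ++
      (pvHexFmt4 (PySem.List.pyGetD arr ((k + j : Nat) : Int) 0) ++ [',', ' '])
      = pvFlat ((arr.drop k).take (j + 1)) := by
  rw [pvGetD, pvFlat_take_succ _ _ (by simp; omega), pvFmtC]

lemma pvMid (arr : List Int) (k m j : Nat) (OUT : List Char)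
    (hk : k % 16 = 0) (hj : 1 ≤ j) (hjm : j < m) (hm : m ≤ 16)
    (hkm : k + m ≤ arr.length) (hlast : m = 16 ∨ k + m = arr.length) :
    (List.range' (k + j) (m - j)).foldl (array_to_code_step arr.length arr)
        (OUT ++ pvFlat ((arr.drop k).take j))
      = OUT ++ pvLine ((arr.drop k).take m) ++ ['\n'] ++
          (if k + m = arr.length then [] else "    ".toList) := by
  have hrange : m - j = (m - (j + 1)) + 1 := by omega
  rw [hrange, List.range'_succ, List.foldl_cons]
  have hmod : (k + j) % 16 = j := by omega
  by_cases hend : j + 1 = m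
  · have hstep : array_to_code_step arr.length arr (OUT ++ pvFlat ((arr.drop k).take j)) (k + j)
        = OUT ++ pvLine ((arr.drop k).take m) ++ ['\n'] ++
            (if k + m = arr.length then [] else "    ".toList) := by
      simp only [array_to_code_step, hmod]
      rw [if_neg (show ¬ (j = 0) by omega)]
      rw [if_pos (show j = 15 ∨ k + j = arr.length - 1 by
        rcases hlast with h16 | hn
        · left; omega
        · right; omega)]
      simp only [List.append_assoc]
      rw [pvAppStep arr k j (by omega), hend]
      have hne : (arr.drop k).take m ≠ [] := by
        have hl : ((arr.drop k).take m).length = m := by simp; omega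
        intro hc; rw [hc] at hl; simp at hl; omega
      rw [pvFlat_eq_line _ hne]
      rw [show OUT ++ (pvLine ((arr.drop k).take m) ++ [',', ' '])
            = (OUT ++ pvLine ((arr.drop k).take m)) ++ [',', ' '] by simp [List.append_assoc]]
      rw [pvTrim]
      by_cases hfin : k + m = arr.length
      · rw [if_neg (show ¬ (k + j ≠ arr.length - 1) by omega), if_pos hfin]
        simp
      · rw [if_pos (show k + j ≠ arr.length - 1 by omega), if_neg hfin]
        simp
    rw [hstep, show m - (j + 1) = 0 by omega]
    simp
  · have hstep : array_to_code_step arr.length arr (OUT ++ pvFlat ((arr.drop k).take j)) (k + j)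
        = OUT ++ pvFlat ((arr.drop k).take (j + 1)) := by
      simp only [array_to_code_step, hmod]
      rw [if_neg (show ¬ (j = 0) by omega)]
      rw [if_neg (show ¬ (j = 15 ∨ k + j = arr.length - 1) by omega)]
      simp only [List.append_assoc]
      rw [pvAppStep arr k j (by omega)]
    rw [hstep]
    exact pvMid arr k m (j + 1) OUT hk (by omega) (by omega) hm hkm hlast
  termination_by m - j

lemma pvChunk (arr : List Int) (k : Nat) (out : List Char)
    (hk : k % 16 = 0) (hkn : k < arr.length) :
    (List.range' k (min 16 (arr.length - k))).foldl (array_to_code_step arr.length arr) out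
      = out ++ "    ".toList ++ pvLine ((arr.drop k).take (min 16 (arr.length - k))) ++ ['\n'] ++
          (if k + min 16 (arr.length - k) = arr.length then [] else "    ".toList) := by
  have hm1 : min 16 (arr.length - k) = (min 16 (arr.length - k) - 1) + 1 := by omega
  conv_lhs => rw [hm1]
  rw [List.range'_succ, List.foldl_cons]
  have e0 : pvHexFmt4 (PySem.List.pyGetD arr ((k : Nat) : Int) 0) ++ [',', ' ']
      = pvFlat ((arr.drop k).take (0 + 1)) := by
    have h := pvAppStep arr k 0 (by omega)
    simpa [pvFlat] using h
  by_cases h1 : min 16 (arr.length - k) = 1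
  · have hstep : array_to_code_step arr.length arr out k
        = out ++ "    ".toList ++ pvLine ((arr.drop k).take (min 16 (arr.length - k))) ++ ['\n'] ++
            (if k + min 16 (arr.length - k) = arr.length then [] else "    ".toList) := by
      simp only [array_to_code_step, hk, if_true]
      rw [if_pos (show (0 : Nat) = 15 ∨ k = arr.length - 1 by right; omega)]
      simp only [List.append_assoc]
      rw [e0]
      have hne : (arr.drop k).take (0 + 1) ≠ [] := by
        have hl : ((arr.drop k).take (0 + 1)).length = 1 := by simp; omega
        intro hc; rw [hc] at hl; simp at hl
      rw [pvFlat_eq_line _ hne]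
      rw [show out ++ ("    ".toList ++ (pvLine ((arr.drop k).take (0 + 1)) ++ [',', ' ']))
            = (out ++ "    ".toList ++ pvLine ((arr.drop k).take (0 + 1))) ++ [',', ' '] by
        simp [List.append_assoc]]
      rw [pvTrim]
      rw [if_neg (show ¬ (k ≠ arr.length - 1) by omega)]
      rw [if_pos (show k + min 16 (arr.length - k) = arr.length by omega)]
      rw [show (0 : Nat) + 1 = min 16 (arr.length - k) by omega]
      simp
    rw [hstep, show min 16 (arr.length - k) - 1 = 0 by omega]
    simp [h1]
  · have hstep : array_to_code_step arr.length arr out k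
        = (out ++ "    ".toList) ++ pvFlat ((arr.drop k).take 1) := by
      simp only [array_to_code_step, hk, if_true]
      rw [if_neg (show ¬ ((0 : Nat) = 15 ∨ k = arr.length - 1) by
        rintro (h15 | hlast)
        · omega
        · omega)]
      simp only [List.append_assoc]
      rw [e0]
    rw [hstep]
    have hmid := pvMid arr k (min 16 (arr.length - k)) 1 (out ++ "    ".toList) hk
      (by omega) (by omega) (by omega) (by omega) (by omega)
    simpa [List.append_assoc] using hmid

lemma pvMain (arr : List Int) (k : Nat) (out : List Char)
    (hk : k % 16 = 0) (hkn : k < arr.length) :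
    (List.range' k (arr.length - k)).foldl (array_to_code_step arr.length arr) out
      = out ++ pvTail (arr.drop k) := by
  have hsplit : arr.length - k
      = min 16 (arr.length - k) + (arr.length - k - min 16 (arr.length - k)) := by omega
  rw [hsplit, ← List.range'_append, List.foldl_append, pvChunk arr k out hk hkn]
  by_cases hle : arr.length - k ≤ 16
  · have hm : min 16 (arr.length - k) = arr.length - k := by omega
    rw [hm]
    have h0 : arr.length - k - (arr.length - k) = 0 := by omega
    rw [h0, if_pos (by omega)]
    rw [pvTail, if_pos (by simp; omega)]
    have : (arr.drop k).take (arr.length - k) = arr.drop k := by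
      apply List.take_of_length_le; simp
    rw [this]
    simp
  · have hm : min 16 (arr.length - k) = 16 := by omega
    rw [hm, if_neg (by omega)]
    have hrec := pvMain arr (k + 16)
      (out ++ "    ".toList ++ pvLine ((arr.drop k).take 16) ++ ['\n'] ++ "    ".toList)
      (by omega) (by omega)
    have hcount : arr.length - k - 16 = arr.length - (k + 16) := by omega
    rw [hcount, hrec]
    have hgt : ¬ ((arr.drop k).length ≤ 16) := by simp; omega
    conv_rhs => rw [pvTail, if_neg hgt]
    have hdd : (arr.drop k).drop 16 = arr.drop (k + 16) := by
      rw [List.drop_drop, Nat.add_comm]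
    rw [hdd]
    simp [List.append_assoc]
  termination_by arr.length - k

lemma pvA_eq (arr : List Int) (h : arr ≠ []) :
    array_to_code arr = String.ofList ("byte_array = [\n".toList ++ pvTail arr ++ [']']) := by
  unfold array_to_code
  have hlen : 0 < arr.length := List.length_pos_of_ne_nil h
  rw [List.range_eq_range']
  have hm := pvMain arr 0 ("byte_array = [\n".toList) (by omega) hlen
  simp only [Nat.sub_zero, List.drop_zero] at hm
  rw [hm]

def pvChunks (l : List Int) : List (List Char) :=
  if h : l = [] then [] else pvLine (l.take 16) :: pvChunks (l.drop 16)
  termination_by l.length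
  decreasing_by
    have : l.length ≠ 0 := fun hl => h (List.eq_nil_of_length_eq_zero hl)
    simp; omega

lemma pvRangeCons (a b : Int) (h : a < b) :
    PySem.List.pyRange a b 16 = a :: PySem.List.pyRange (a + 16) b 16 := by
  rw [PySem.List.pyRange_of_pos a b (by norm_num), PySem.List.pyRange_of_pos (a + 16) b (by norm_num)]
  rw [if_pos h]
  have hM : ((b - a + 16 - 1) / 16).toNat
      = (if a + 16 < b then ((b - (a + 16) + 16 - 1) / 16).toNat else 0) + 1 := by
    split_ifs with h2 <;> omega
  rw [hM, List.range_succ_eq_map]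
  simp only [List.map_cons, List.map_map, Nat.cast_zero, mul_zero, add_zero]
  refine congrArg₂ _ rfl ?_
  apply List.map_congr_left
  intro x _
  simp [Function.comp]
  ring

lemma pvShift (arr : List Int) (k : Nat) :
    (PySem.List.pyRange (k : Int) (arr.length : Int) 16).map
        (fun i => pvLine (PySem.List.slice arr (some i) (some (i + 16))))
      = pvChunks (arr.drop k) := by
  by_cases h : k < arr.length
  · rw [pvRangeCons _ _ (by exact_mod_cast h), List.map_cons]
    have hsl : PySem.List.slice arr (some (k : Int)) (some ((k : Int) + 16))
        = (arr.drop k).take 16 := by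
      rw [show ((k : Int) + 16) = ((k : Int) + ((16 : Nat) : Int)) by norm_num,
        PySem.List.slice_natCast_add]
    rw [hsl, show ((k : Int) + 16) = (((k + 16 : Nat)) : Int) by push_cast; ring,
      pvShift arr (k + 16)]
    have hne : arr.drop k ≠ [] := by
      intro hc
      have := congrArg List.length hc
      simp at this; omega
    conv_rhs => rw [pvChunks, dif_neg hne]
    rw [show (arr.drop k).drop 16 = arr.drop (k + 16) by rw [List.drop_drop, Nat.add_comm]]
  · have hempty : PySem.List.pyRange (k : Int) (arr.length : Int) 16 = [] := by
      rw [PySem.List.pyRange_of_pos _ _ (by norm_num),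
        if_neg (show ¬ ((k : Int) < (arr.length : Int)) by exact_mod_cast h)]
      simp
    rw [hempty, show arr.drop k = [] from List.drop_eq_nil_iff.mpr (by omega), pvChunks]
    simp
  termination_by arr.length - k

lemma pvJoinLines (l : List Int) (h : l ≠ []) :
    "    ".toList ++ PySem.Chars.join "\n        ".toList (pvChunks l) ++ ['\n'] = pvTail l := by
  rw [pvChunks, dif_neg h, pvTail]
  by_cases hle : l.length ≤ 16
  · have hdrop : l.drop 16 = [] := by
      rw [List.drop_eq_nil_iff]; omega
    rw [if_pos hle, hdrop, pvChunks, dif_pos rfl, PySem.Chars.join_singleton,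
      List.take_of_length_le hle]
  · rw [if_neg hle]
    have hne : l.drop 16 ≠ [] := by
      intro hc
      have := congrArg List.length hc
      simp at this; omega
    have ih := pvJoinLines (l.drop 16) hne
    rw [← ih]
    have hcons : pvChunks (l.drop 16)
        = pvLine ((l.drop 16).take 16) :: pvChunks ((l.drop 16).drop 16) := by
      rw [pvChunks, dif_neg hne]
    rw [hcons, PySem.Chars.join_cons_cons]
    have e8 : "\n        ".toList = '\n' :: ("    ".toList ++ "    ".toList) := by decide
    rw [e8]
    simp [List.append_assoc]
  termination_by l.length

lemma pvB_eq (arr : List Int) (h : arr ≠ []) :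
    array_to_code_alt arr = String.ofList ("byte_array = [\n".toList ++ pvTail arr ++ [']']) := by
  unfold array_to_code_alt
  rw [if_neg h, PySem.List.foldl_append_singleton_eq_map, List.nil_append]
  have hshift := pvShift arr 0
  simp only [Nat.cast_zero, List.drop_zero] at hshift
  rw [hshift, ← pvJoinLines arr h]
  congr 1
  have e2 : "byte_array = [\n    ".toList = "byte_array = [\n".toList ++ "    ".toList := by decide
  have e3 : "\n]".toList = ['\n', ']'] := by decide
  rw [e2, e3]
  simp [List.append_assoc]

-- ===== VERDICT (by name: the statement is the Claim_ definition above) =====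
theorem array_to_code_spec : Claim_equal_array_to_code := by
  intro arr _
  unfold Spec_array_to_code
  by_cases h : arr = []
  · subst h; decide
  · rw [pvA_eq arr h, pvB_eq arr h]
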